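-- pv_equiv track=rewrite | github.com/agentidx/agentindex | smedjan/scripts/template_consistency.py | _vertical_report
-- ===== SOURCE A (Python) =====
-- def _vertical_report(
--     registry: str, king_union: set[str], non_king_union: set[str],
--     k_ok: int, k_fail: int, n_ok: int, n_fail: int,
-- ) -> tuple[str, bool, str]:
--     """Return (markdown_block, is_regression, status_label)."""
--     # A vertical with zero Kings cannot be audited for regression — the
--     # King set is empty by construction, so every non-King section would
--     # trip the subset test. Mark those separately.
--     if k_ok == 0 and n_ok == 0:
--         status = "insufficient-sample"
--         regression = False
--     elif k_ok == 0:
--         status = "kings-absent"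
--         regression = False
--     else:
--         regression = bool(non_king_union - king_union)
--         status = "REGRESSION" if regression else "ok"
--
--     lines: list[str] = []
--     lines.append(f"### `{registry}` — {status}")
--     lines.append("")
--     lines.append(
--         f"- Kings sampled: **{k_ok}** rendered (+{k_fail} failed). "
--         f"Non-Kings sampled: **{n_ok}** rendered (+{n_fail} failed)."
--     )
--     lines.append(
--         f"- King-section count: **{len(king_union)}**. "
--         f"Non-King-section count: **{len(non_king_union)}**."
--     )
--     shared = king_union & non_king_union
--     king_only = king_union - non_king_union
--     non_king_only = non_king_union - king_union
--     lines.append(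
--         f"- Shared: **{len(shared)}** · King-only: **{len(king_only)}** · "
--         f"Non-King-only (regression if >0): **{len(non_king_only)}**."
--     )
--     lines.append("")
--
--     def _bullets(header: str, items: set[str]) -> None:
--         if not items:
--             return
--         lines.append(f"**{header}**")
--         for t in sorted(items):
--             lines.append(f"- `{t}`")
--         lines.append("")
--
--     if regression:
--         _bullets("Non-King-only sections (flagged):", non_king_only)
--     elif non_king_only and status == "kings-absent":
--         _bullets("Non-King-only sections (no King baseline):", non_king_only)
--     _bullets("King-only sections:", king_only)
--     _bullets("Shared sections:", shared)
--
--     return "\n".join(lines), regression, status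
-- ===== SOURCE B (Python) =====
-- def _vertical_report(
--     registry: str, king_union: set[str], non_king_union: set[str],
--     k_ok: int, k_fail: int, n_ok: int, n_fail: int,
-- ) -> tuple[str, bool, str]:
--     """Return (markdown_block, is_regression, status_label)."""
--     # Sort both section-name sets once, then partition them with a single
--     # two-pointer merge pass (no set algebra, no membership tests); the three
--     # partitions come out already sorted, so the bullet blocks need no sorting.
--     ks = sorted(king_union)
--     ns = sorted(non_king_union)
--     shared: list[str] = []
--     king_only: list[str] = []
--     non_king_only: list[str] = []
--     i = j = 0
--     while i < len(ks) and j < len(ns):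
--         if ks[i] == ns[j]:
--             shared.append(ks[i]); i += 1; j += 1
--         elif ks[i] < ns[j]:
--             king_only.append(ks[i]); i += 1
--         else:
--             non_king_only.append(ns[j]); j += 1
--     king_only.extend(ks[i:])
--     non_king_only.extend(ns[j:])
--
--     if k_ok == 0 and n_ok == 0:
--         status, regression = "insufficient-sample", False
--     elif k_ok == 0:
--         status, regression = "kings-absent", False
--     else:
--         regression = len(non_king_only) > 0
--         status = "REGRESSION" if regression else "ok"
--
--     def _block(header: str, items: list[str]) -> list[str]:
--         if not items:
--             return []
--         return ["**%s**" % header] + ["- `%s`" % t for t in items] + [""]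
--
--     lines = [
--         "### `%s` — %s" % (registry, status),
--         "",
--         "- Kings sampled: **%d** rendered (+%d failed). "
--         "Non-Kings sampled: **%d** rendered (+%d failed)." % (k_ok, k_fail, n_ok, n_fail),
--         "- King-section count: **%d**. "
--         "Non-King-section count: **%d**." % (len(ks), len(ns)),
--         "- Shared: **%d** · King-only: **%d** · "
--         "Non-King-only (regression if >0): **%d**."
--         % (len(shared), len(king_only), len(non_king_only)),
--         "",
--     ]
--     if regression:
--         lines += _block("Non-King-only sections (flagged):", non_king_only)
--     elif non_king_only and status == "kings-absent":
--         lines += _block("Non-King-only sections (no King baseline):", non_king_only)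
--     lines += _block("King-only sections:", king_only)
--     lines += _block("Shared sections:", shared)
--     return "\n".join(lines), regression, status
-- ===== Notes on version B (the rewrite author's own statement) =====
-- stated objective: alternative
-- what changed: Replaces A's set-algebra partitioning (intersection and two set differences plus per-block sorting) by sorting both section-name sets once and partitioning them with a single two-pointer merge pass that uses no membership tests and yields the three partitions already sorted, so the bullet blocks are emitted without re-sorting; regression is derived from the non-king-only partition; the bullet helper returns block values that are concatenated instead of mutating a shared lines list.
import Mathlib
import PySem

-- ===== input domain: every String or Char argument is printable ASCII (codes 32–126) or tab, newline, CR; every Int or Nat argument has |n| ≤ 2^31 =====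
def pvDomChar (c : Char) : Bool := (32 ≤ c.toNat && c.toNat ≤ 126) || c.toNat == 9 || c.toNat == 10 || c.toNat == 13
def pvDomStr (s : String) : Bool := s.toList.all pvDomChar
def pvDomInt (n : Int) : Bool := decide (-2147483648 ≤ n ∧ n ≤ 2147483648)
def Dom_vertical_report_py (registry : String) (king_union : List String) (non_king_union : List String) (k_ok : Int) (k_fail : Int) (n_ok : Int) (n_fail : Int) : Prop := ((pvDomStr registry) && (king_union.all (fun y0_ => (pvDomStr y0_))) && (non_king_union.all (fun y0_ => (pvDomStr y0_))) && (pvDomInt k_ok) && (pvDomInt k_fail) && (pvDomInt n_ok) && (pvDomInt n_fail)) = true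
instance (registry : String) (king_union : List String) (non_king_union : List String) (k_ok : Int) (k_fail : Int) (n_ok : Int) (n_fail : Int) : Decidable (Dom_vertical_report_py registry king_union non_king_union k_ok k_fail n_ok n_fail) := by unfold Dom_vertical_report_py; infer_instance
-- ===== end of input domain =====

-- B sorts both section-name sets once and partitions them with a two-pointer merge pass
-- (no set algebra, no membership tests; the partitions come out already sorted, so the
-- bullet blocks need no re-sorting). Objective: alternative.

-- ===== PORT A =====

-- f-string / string concatenation, ported via PySem.Str.join (exact)
def pvCat (parts : List String) : String := PySem.Str.join "" parts

-- A's nested `_bullets(header, items)` helper: appends to `lines` and returns the new list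
def pvBulletsA (lines : List String) (header : String) (items : List String) : List String :=
  if items.isEmpty then lines
  else
    (lines ++ [pvCat ["**", header, "**"]]
       ++ (PySem.List.sorted items (fun t => t) false).map (fun t => pvCat ["- `", t, "`"]))
      ++ [""]

def vertical_report_py (registry : String) (king_union : List String) (non_king_union : List String) (k_ok : Int) (k_fail : Int) (n_ok : Int) (n_fail : Int) : String × Bool × String :=
  let sr : String × Bool :=
    if k_ok == 0 && n_ok == 0 then ("insufficient-sample", false)
    else if k_ok == 0 then ("kings-absent", false)
    else
      let regression := !(PySem.Set.diff non_king_union king_union).isEmpty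
      ((if regression then "REGRESSION" else "ok"), regression)
  let status := sr.1
  let regression := sr.2
  let lines : List String :=
    [pvCat ["### `", registry, "` — ", status],
     "",
     pvCat ["- Kings sampled: **", PySem.Int.toStr k_ok, "** rendered (+", PySem.Int.toStr k_fail,
            " failed). Non-Kings sampled: **", PySem.Int.toStr n_ok, "** rendered (+",
            PySem.Int.toStr n_fail, " failed)."],
     pvCat ["- King-section count: **", PySem.Int.toStr (king_union.length : Int),
            "**. Non-King-section count: **", PySem.Int.toStr (non_king_union.length : Int), "**."]]
  let shared := PySem.Set.inter king_union non_king_union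
  let king_only := PySem.Set.diff king_union non_king_union
  let non_king_only := PySem.Set.diff non_king_union king_union
  let lines := lines ++
    [pvCat ["- Shared: **", PySem.Int.toStr (shared.length : Int), "** · King-only: **",
            PySem.Int.toStr (king_only.length : Int), "** · Non-King-only (regression if >0): **",
            PySem.Int.toStr (non_king_only.length : Int), "**."],
     ""]
  let lines :=
    if regression then pvBulletsA lines "Non-King-only sections (flagged):" non_king_only
    else if (!non_king_only.isEmpty) && status == "kings-absent" then
      pvBulletsA lines "Non-King-only sections (no King baseline):" non_king_only
    else lines
  let lines := pvBulletsA lines "King-only sections:" king_only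
  let lines := pvBulletsA lines "Shared sections:" shared
  (PySem.Str.join "\n" lines, regression, status)

-- ===== PORT B =====

-- B's two-pointer merge loop over the two sorted lists, as the obvious structural
-- recursion on the two suffixes still to be scanned (the `i`/`j` cursors of Source B)
def pvMerge : List String → List String → List String × List String × List String
  | [], ys => ([], [], ys)
  | x :: xs, [] => ([], x :: xs, [])
  | x :: xs, y :: ys =>
    if x == y then
      let r := pvMerge xs ys
      (x :: r.1, r.2.1, r.2.2)
    else if x < y then
      let r := pvMerge xs (y :: ys)
      (r.1, x :: r.2.1, r.2.2)
    else
      let r := pvMerge (x :: xs) ys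
      (r.1, r.2.1, y :: r.2.2)
  termination_by xs ys => xs.length + ys.length

-- B's `_block(header, items)`: returns the bullet block as a value; items arrive sorted
def pvBlock (header : String) (items : List String) : List String :=
  if items.isEmpty then []
  else pvCat ["**", header, "**"] :: items.map (fun t => pvCat ["- `", t, "`"]) ++ [""]

def vertical_report_py_alt (registry : String) (king_union : List String) (non_king_union : List String) (k_ok : Int) (k_fail : Int) (n_ok : Int) (n_fail : Int) : String × Bool × String :=
  let ks := PySem.List.sorted king_union (fun t => t) false
  let ns := PySem.List.sorted non_king_union (fun t => t) false
  let m := pvMerge ks ns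
  let shared := m.1
  let king_only := m.2.1
  let non_king_only := m.2.2
  let sr : String × Bool :=
    if k_ok == 0 && n_ok == 0 then ("insufficient-sample", false)
    else if k_ok == 0 then ("kings-absent", false)
    else
      let regression := decide (0 < non_king_only.length)
      ((if regression then "REGRESSION" else "ok"), regression)
  let status := sr.1
  let regression := sr.2
  let lines : List String :=
    [pvCat ["### `", registry, "` — ", status],
     "",
     pvCat ["- Kings sampled: **", PySem.Int.toStr k_ok, "** rendered (+", PySem.Int.toStr k_fail,
            " failed). Non-Kings sampled: **", PySem.Int.toStr n_ok, "** rendered (+",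
            PySem.Int.toStr n_fail, " failed)."],
     pvCat ["- King-section count: **", PySem.Int.toStr (ks.length : Int),
            "**. Non-King-section count: **", PySem.Int.toStr (ns.length : Int), "**."],
     pvCat ["- Shared: **", PySem.Int.toStr (shared.length : Int), "** · King-only: **",
            PySem.Int.toStr (king_only.length : Int), "** · Non-King-only (regression if >0): **",
            PySem.Int.toStr (non_king_only.length : Int), "**."],
     ""]
    ++ (if regression then pvBlock "Non-King-only sections (flagged):" non_king_only
        else if (!non_king_only.isEmpty) && status == "kings-absent" then
          pvBlock "Non-King-only sections (no King baseline):" non_king_only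
        else [])
    ++ pvBlock "King-only sections:" king_only
    ++ pvBlock "Shared sections:" shared
  (PySem.Str.join "\n" lines, regression, status)

-- ===== PRECONDITION & SPEC =====
-- Pre_ only pins down the set-typed arguments: king_union and non_king_union port Python
-- sets, whose List representation holds DISTINCT elements (type convention); no input the
-- Python function accepts is excluded.
def Pre_vertical_report_py (registry : String) (king_union : List String) (non_king_union : List String) (k_ok : Int) (k_fail : Int) (n_ok : Int) (n_fail : Int) : Prop :=
  king_union.Nodup ∧ non_king_union.Nodup
instance (registry : String) (king_union : List String) (non_king_union : List String) (k_ok : Int) (k_fail : Int) (n_ok : Int) (n_fail : Int) : Decidable (Pre_vertical_report_py registry king_union non_king_union k_ok k_fail n_ok n_fail) := by unfold Pre_vertical_report_py; infer_instance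

def pvWitness_vertical_report_py : String × List String × List String × Int × Int × Int × Int :=
  ("news", ["body", "title"], ["body", "extra"], 2, 0, 3, 1)

def Spec_vertical_report_py (registry : String) (king_union : List String) (non_king_union : List String) (k_ok : Int) (k_fail : Int) (n_ok : Int) (n_fail : Int) (out : String × Bool × String) : Prop := out = vertical_report_py_alt registry king_union non_king_union k_ok k_fail n_ok n_fail
instance (registry : String) (king_union : List String) (non_king_union : List String) (k_ok : Int) (k_fail : Int) (n_ok : Int) (n_fail : Int) (out : String × Bool × String) : Decidable (Spec_vertical_report_py registry king_union non_king_union k_ok k_fail n_ok n_fail out) := by unfold Spec_vertical_report_py; infer_instance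

-- ===== CLAIM (what is proved, stated in full; the proofs are below) =====
def Claim_equal_vertical_report_py : Prop := ∀ (registry : String) (king_union : List String) (non_king_union : List String) (k_ok : Int) (k_fail : Int) (n_ok : Int) (n_fail : Int), Dom_vertical_report_py registry king_union non_king_union k_ok k_fail n_ok n_fail → Pre_vertical_report_py registry king_union non_king_union k_ok k_fail n_ok n_fail → Spec_vertical_report_py registry king_union non_king_union k_ok k_fail n_ok n_fail (vertical_report_py registry king_union non_king_union k_ok k_fail n_ok n_fail)

-- ===== LEMMAS AND PROOFS =====

theorem pvWitness_ok :
    Dom_vertical_report_py (pvWitness_vertical_report_py.1) (pvWitness_vertical_report_py.2.1) (pvWitness_vertical_report_py.2.2.1) (pvWitness_vertical_report_py.2.2.2.1) (pvWitness_vertical_report_py.2.2.2.2.1) (pvWitness_vertical_report_py.2.2.2.2.2.1) (pvWitness_vertical_report_py.2.2.2.2.2.2)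
    ∧ Pre_vertical_report_py (pvWitness_vertical_report_py.1) (pvWitness_vertical_report_py.2.1) (pvWitness_vertical_report_py.2.2.1) (pvWitness_vertical_report_py.2.2.2.1) (pvWitness_vertical_report_py.2.2.2.2.1) (pvWitness_vertical_report_py.2.2.2.2.2.1) (pvWitness_vertical_report_py.2.2.2.2.2.2) := by
  decide

-- the merge pass on strictly increasing lists computes intersection and the two differences
theorem contains_cons_of_ne {a b : String} (l : List String) (h : b ≠ a) :
    (a :: l).contains b = l.contains b := by
  simp [h]

theorem pvMerge_eq (xs ys : List String)
    (hx : List.Pairwise (· < ·) xs) (hy : List.Pairwise (· < ·) ys) :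
    pvMerge xs ys = (xs.filter (fun x => ys.contains x),
                     xs.filter (fun x => !ys.contains x),
                     ys.filter (fun y => !xs.contains y)) := by
  fun_induction pvMerge xs ys with
  | case1 ys => simp
  | case2 x xs => simp
  | case3 x xs y ys heq r ih =>
    have hxy : x = y := by simpa using heq
    subst hxy
    have h1 : ∀ z ∈ xs, z ≠ x := fun z hz => ne_of_gt ((List.pairwise_cons.mp hx).1 z hz)
    have h2 : ∀ z ∈ ys, z ≠ x := fun z hz => ne_of_gt ((List.pairwise_cons.mp hy).1 z hz)
    have hr := ih hx.tail hy.tail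
    have e1 : List.filter (fun z => (x :: ys).contains z) xs
        = List.filter (fun z => ys.contains z) xs :=
      List.filter_congr fun z hz => by rw [contains_cons_of_ne ys (h1 z hz)]
    have e2 : List.filter (fun z => !(x :: ys).contains z) xs
        = List.filter (fun z => !ys.contains z) xs :=
      List.filter_congr fun z hz => by rw [contains_cons_of_ne ys (h1 z hz)]
    have e3 : List.filter (fun z => !(x :: xs).contains z) ys
        = List.filter (fun z => !xs.contains z) ys :=
      List.filter_congr fun z hz => by rw [contains_cons_of_ne xs (h2 z hz)]
    show (x :: (pvMerge xs ys).1, (pvMerge xs ys).2.1, (pvMerge xs ys).2.2) = _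
    rw [hr]
    simp
    refine ⟨?_, ?_, ?_⟩
    · exact (List.filter_congr fun z hz => by simp [h1 z hz])
    · exact (List.filter_congr fun z hz => by simp [h1 z hz])
    · exact (List.filter_congr fun z hz => by simp [h2 z hz])
  | case4 x xs y ys heq hlt r ih =>
    have hxy : x < y := by simpa using hlt
    have hne : ∀ z ∈ y :: ys, z ≠ x := by
      intro z hz
      rcases List.mem_cons.mp hz with h | h
      · exact h ▸ ne_of_gt hxy
      · exact ne_of_gt (lt_trans hxy ((List.pairwise_cons.mp hy).1 z h))
    have hr := ih hx.tail hy
    have e3 : List.filter (fun z => !(x :: xs).contains z) (y :: ys)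
        = List.filter (fun z => !xs.contains z) (y :: ys) :=
      List.filter_congr fun z hz => by rw [contains_cons_of_ne xs (hne z hz)]
    have hxmem : ((y :: ys).contains x) = false := by
      simp only [List.contains_eq_mem, decide_eq_false_iff_not]
      intro hmem; exact (hne x hmem) rfl
    show ((pvMerge xs (y :: ys)).1, x :: (pvMerge xs (y :: ys)).2.1, (pvMerge xs (y :: ys)).2.2) = _
    rw [hr]
    have hAB : List.filter (fun z => !decide (z = x) && !decide (z ∈ xs)) ys
        = List.filter (fun z => !decide (z ∈ xs)) ys :=
      List.filter_congr fun z hz => by simp [hne z (List.mem_cons_of_mem _ hz)]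
    have hyx' : ¬ y = x := hne y List.mem_cons_self
    have hxys : x ∉ ys := fun h => (hne x (List.mem_cons_of_mem _ h)) rfl
    have hxney : ¬ x = y := fun h => hyx' h.symm
    simp [List.filter_cons, hxney, hxys, hyx', hAB]
  | case5 x xs y ys heq hnlt r ih =>
    have hne' : x ≠ y := by simpa using heq
    have hyx : y < x := by
      have : ¬ x < y := by simpa using hnlt
      exact lt_of_le_of_ne (le_of_not_gt this) (fun h => hne' h.symm)
    have hne : ∀ z ∈ x :: xs, z ≠ y := by
      intro z hz
      rcases List.mem_cons.mp hz with h | h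
      · exact h ▸ ne_of_gt hyx
      · exact ne_of_gt (lt_trans hyx ((List.pairwise_cons.mp hx).1 z h))
    have hr := ih hx hy.tail
    have e1 : List.filter (fun z => (y :: ys).contains z) (x :: xs)
        = List.filter (fun z => ys.contains z) (x :: xs) :=
      List.filter_congr fun z hz => by rw [contains_cons_of_ne ys (hne z hz)]
    have e2 : List.filter (fun z => !(y :: ys).contains z) (x :: xs)
        = List.filter (fun z => !ys.contains z) (x :: xs) :=
      List.filter_congr fun z hz => by rw [contains_cons_of_ne ys (hne z hz)]
    have hymem : ((x :: xs).contains y) = false := by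
      simp only [List.contains_eq_mem, decide_eq_false_iff_not]
      intro hmem; exact (hne y hmem) rfl
    show ((pvMerge (x :: xs) ys).1, (pvMerge (x :: xs) ys).2.1, y :: (pvMerge (x :: xs) ys).2.2) = _
    rw [hr]
    rw [← e1, ← e2]
    have hynxs : y ∉ xs := fun h =>
      (ne_of_gt (lt_trans hyx ((List.pairwise_cons.mp hx).1 y h))) rfl
    have hyx'' : ¬ y = x := fun h => hne' h.symm
    simp [List.filter_cons, hyx'', hynxs]

theorem pvBlock_eq (lines : List String) (header : String) (itemsA itemsB : List String)
    (h : PySem.List.sorted itemsA (fun t => t) false = itemsB) :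
    pvBulletsA lines header itemsA = lines ++ pvBlock header itemsB := by
  have hlen : itemsB.length = itemsA.length := by
    rw [← h]; exact (PySem.List.sorted_perm itemsA (fun t => t) false).length_eq
  unfold pvBulletsA pvBlock
  by_cases hA : itemsA.isEmpty
  · have hB : itemsB.isEmpty := by
      rw [List.isEmpty_iff_length_eq_zero] at hA ⊢; omega
    simp [hA, hB]
  · have hAne : itemsA ≠ [] := by simpa [List.isEmpty_iff] using hA
    simp [hA, ← h, List.append_assoc, PySem.List.sorted_eq_nil_iff, hAne]

theorem pv_decide_pos (l : List String) : decide (0 < l.length) = !l.isEmpty := by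
  cases l <;> simp

-- strict order on the sorted list of a duplicate-free list
theorem pv_sorted_strict (K : List String) (hK : K.Nodup) :
    List.Pairwise (· < ·) (PySem.List.sorted K (fun t => t) false) := by
  have hle := PySem.List.sorted_pairwise K (fun t => t)
  have hnd : (PySem.List.sorted K (fun t => t) false).Nodup :=
    ((PySem.List.sorted_perm K (fun t => t) false).symm).nodup hK
  exact (hle.and hnd).imp fun h => lt_of_le_of_ne h.1 h.2

-- sorting then filtering = filtering then sorting, for duplicate-free input
theorem pv_sorted_filter (K : List String) (hK : K.Nodup) (p : String → Bool) :
    PySem.List.sorted (K.filter p) (fun t => t) false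
      = (PySem.List.sorted K (fun t => t) false).filter p := by
  refine PySem.List.sorted_eq_of_perm_of_pairwise_lt _ _ _ ?_ ?_
  · exact (PySem.List.sorted_perm K (fun t => t) false).filter p
  · exact (pv_sorted_strict K hK).filter p

-- ===== VERDICT (by name: the statement is the Claim_ definition above) =====
set_option maxRecDepth 2000 in
set_option maxHeartbeats 2000000 in
theorem vertical_report_py_spec : Claim_equal_vertical_report_py := by
  intro registry K N k_ok k_fail n_ok n_fail _ hpre
  obtain ⟨hK, hN⟩ := hpre
  show vertical_report_py registry K N k_ok k_fail n_ok n_fail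
      = vertical_report_py_alt registry K N k_ok k_fail n_ok n_fail
  have permK := PySem.List.sorted_perm K (fun t => t) false
  have permN := PySem.List.sorted_perm N (fun t => t) false
  have hksp := pv_sorted_strict K hK
  have hnsp := pv_sorted_strict N hN
  have hcN : (fun x => (PySem.List.sorted N (fun t => t) false).contains x)
      = fun x => N.contains x :=
    funext fun z => by simp [List.contains_eq_mem, permN.mem_iff]
  have hcK : (fun x => (PySem.List.sorted K (fun t => t) false).contains x)
      = fun x => K.contains x :=
    funext fun z => by simp [List.contains_eq_mem, permK.mem_iff]
  have hlf : ∀ p : String → Bool, (K.filter p).length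
      = ((PySem.List.sorted K (fun t => t) false).filter p).length :=
    fun p => ((permK.filter p).length_eq).symm
  have hlfN : ∀ p : String → Bool, (N.filter p).length
      = ((PySem.List.sorted N (fun t => t) false).filter p).length :=
    fun p => ((permN.filter p).length_eq).symm
  have hef : ∀ p : String → Bool, (N.filter p).isEmpty
      = ((PySem.List.sorted N (fun t => t) false).filter p).isEmpty := by
    intro p
    have hl := hlfN p
    rcases h1 : N.filter p with _ | _ <;>
      rcases h2 : (PySem.List.sorted N (fun t => t) false).filter p with _ | _ <;>
      simp_all
  have hcNn : (fun x => !(PySem.List.sorted N (fun t => t) false).contains x)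
      = fun x => !N.contains x := funext fun z => by rw [congrFun hcN z]
  have hcKn : (fun x => !(PySem.List.sorted K (fun t => t) false).contains x)
      = fun x => !K.contains x := funext fun z => by rw [congrFun hcK z]
  have bS : ∀ L : List String, pvBulletsA L "Shared sections:" (K.filter (fun x => N.contains x))
      = L ++ pvBlock "Shared sections:" ((PySem.List.sorted K (fun t => t) false).filter (fun x => N.contains x)) :=
    fun L => pvBlock_eq _ _ _ _ (pv_sorted_filter K hK _)
  have bK : ∀ L : List String, pvBulletsA L "King-only sections:" (K.filter (fun x => !N.contains x))
      = L ++ pvBlock "King-only sections:" ((PySem.List.sorted K (fun t => t) false).filter (fun x => !N.contains x)) :=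
    fun L => pvBlock_eq _ _ _ _ (pv_sorted_filter K hK _)
  have bN1 : ∀ L : List String, pvBulletsA L "Non-King-only sections (flagged):" (N.filter (fun x => !K.contains x))
      = L ++ pvBlock "Non-King-only sections (flagged):" ((PySem.List.sorted N (fun t => t) false).filter (fun x => !K.contains x)) :=
    fun L => pvBlock_eq _ _ _ _ (pv_sorted_filter N hN _)
  have bN2 : ∀ L : List String, pvBulletsA L "Non-King-only sections (no King baseline):" (N.filter (fun x => !K.contains x))
      = L ++ pvBlock "Non-King-only sections (no King baseline):" ((PySem.List.sorted N (fun t => t) false).filter (fun x => !K.contains x)) :=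
    fun L => pvBlock_eq _ _ _ _ (pv_sorted_filter N hN _)
  simp only [vertical_report_py, vertical_report_py_alt, PySem.Set.inter, PySem.Set.diff, PySem.Set.contains]
  rw [pvMerge_eq _ _ hksp hnsp]
  simp only [hcN, hcNn, hcKn]
  simp only [pv_decide_pos]
  simp only [permK.length_eq, permN.length_eq]
  simp only [hlf, hlfN]
  simp only [hef]
  simp only [bS, bK, bN1, bN2]
  simp only [List.append_assoc]
  by_cases h1 : (k_ok == 0 && n_ok == 0) = true <;>
    by_cases h2 : (k_ok == 0) = true <;>
    cases h3 : (List.filter (fun x => !K.contains x) (PySem.List.sorted N (fun t => t) false)).isEmpty <;>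
    simp [h1, h2, h3, List.append_assoc] <;>
    by_cases h4 : n_ok = 0 <;> simp [h4, List.append_assoc]
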